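-- pv_equiv track=rewrite | github.com/miznchimaki/Chinese-CLIP | cn_clip/preprocess/build_lmdb_dataset_multi_proc.py | compute_line_chunks
-- ===== SOURCE A (Python) =====
-- def compute_line_chunks(total_lines: int, num_workers: int):
--     """
--     根据总行数和进程数，按行号均匀切分成若干区间。
--     返回 [(start_line, end_line), ...]，满足：
--         0 = start_0 < end_0 = start_1 < ... < end_{k-1} = total_lines
--     """
--     if total_lines == 0:
--         return []
--
--     num_workers = max(1, min(num_workers, total_lines))
--
--     base = total_lines // num_workers
--     rem = total_lines % num_workers
--
--     chunks = []
--     start = 0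
--     for i in range(num_workers):
--         # 前 rem 个 worker 每人多 1 行
--         length = base + (1 if i < rem else 0)
--         if length <= 0:
--             break
--         end = start + length
--         chunks.append((start, end))
--         start = end
--
--     # 理论上最后一个 end == total_lines
--     return chunks
-- ===== SOURCE B (Python) =====
-- def compute_line_chunks(total_lines: int, num_workers: int):
--     if total_lines <= 0:
--         return []
--     k = max(1, min(num_workers, total_lines))
--     base, rem = divmod(total_lines, k)
--     boundary = lambda i: i * base + min(i, rem)
--     return [(boundary(i), boundary(i + 1)) for i in range(k)]
-- ===== Notes on version B (the rewrite author's own statement) =====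
-- stated objective: simpler
-- what changed: Replaces the running start accumulator with a closed-form boundary(i) = i*base + min(i, rem) and builds the list as a comprehension over range(k), dropping the dead length<=0 break (the <=0 guard subsumes the case where that break ever fired).
import Mathlib
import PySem

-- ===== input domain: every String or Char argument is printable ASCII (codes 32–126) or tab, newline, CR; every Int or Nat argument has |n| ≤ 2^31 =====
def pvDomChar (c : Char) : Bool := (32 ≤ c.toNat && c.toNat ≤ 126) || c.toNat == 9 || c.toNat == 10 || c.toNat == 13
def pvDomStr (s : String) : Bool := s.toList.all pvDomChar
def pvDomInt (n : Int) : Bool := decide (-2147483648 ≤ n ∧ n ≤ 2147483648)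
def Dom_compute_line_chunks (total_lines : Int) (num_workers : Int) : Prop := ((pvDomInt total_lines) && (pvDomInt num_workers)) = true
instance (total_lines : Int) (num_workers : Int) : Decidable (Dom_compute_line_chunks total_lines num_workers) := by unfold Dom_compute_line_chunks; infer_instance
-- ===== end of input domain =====

-- B replaces A's running-start accumulator loop (with its dead break) by a closed-form
-- boundary i*base + min i rem mapped over the range; same cost, simpler (return value only).

-- ===== PORT A =====
-- A's for-loop with its `length <= 0: break`, carrying (start, chunks)
def pvALoop (base rem : Int) : List Int → Int → List (Int × Int) → List (Int × Int)
  | [], _, chunks => chunks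
  | i :: rest, start, chunks =>
    let length := base + (if i < rem then 1 else 0)
    if length ≤ 0 then chunks
    else pvALoop base rem rest (start + length) (chunks ++ [(start, start + length)])

def compute_line_chunks (total_lines : Int) (num_workers : Int) : List (Int × Int) :=
  if total_lines = 0 then []
  else
    let nw := max 1 (min num_workers total_lines)
    let base := PySem.Int.floordiv total_lines nw
    let rem := PySem.Int.mod total_lines nw
    pvALoop base rem (PySem.List.pyRange 0 nw 1) 0 []

-- ===== PORT B =====
def compute_line_chunks_alt (total_lines : Int) (num_workers : Int) : List (Int × Int) :=
  if total_lines ≤ 0 then []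
  else
    let k := max 1 (min num_workers total_lines)
    let base := PySem.Int.floordiv total_lines k
    let rem := PySem.Int.mod total_lines k
    (PySem.List.pyRange 0 k 1).map
      (fun i => (i * base + min i rem, (i + 1) * base + min (i + 1) rem))

-- ===== PRECONDITION & SPEC =====
def Spec_compute_line_chunks (total_lines : Int) (num_workers : Int) (out : List (Int × Int)) : Prop := out = compute_line_chunks_alt total_lines num_workers
instance (total_lines : Int) (num_workers : Int) (out : List (Int × Int)) : Decidable (Spec_compute_line_chunks total_lines num_workers out) := by unfold Spec_compute_line_chunks; infer_instance

-- ===== CLAIM (what is proved, stated in full; the proofs are below) =====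
def Claim_equal_compute_line_chunks : Prop := ∀ (total_lines : Int) (num_workers : Int), Dom_compute_line_chunks total_lines num_workers → Spec_compute_line_chunks total_lines num_workers (compute_line_chunks total_lines num_workers)

-- ===== LEMMAS AND PROOFS =====

-- A's loop, started at boundary a and with positive base, produces exactly the mapped boundaries.
theorem pvALoop_eq_map (base rem k : Int) (hbase : 1 ≤ base)
    (n : Nat) : ∀ (a : Int) (acc : List (Int × Int)), 0 ≤ a → a ≤ k → (k - a).toNat = n →
    pvALoop base rem (PySem.List.pyRange a k 1) (a * base + min a rem) acc =
      acc ++ (PySem.List.pyRange a k 1).map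
        (fun i => (i * base + min i rem, (i + 1) * base + min (i + 1) rem)) := by
  induction n with
  | zero =>
    intro a acc _ hak hn
    have hk : k ≤ a := by omega
    rw [PySem.List.pyRange_one_eq_nil hk]
    simp [pvALoop]
  | succ n ih =>
    intro a acc ha hak hn
    have hlt : a < k := by omega
    rw [PySem.List.pyRange_one_cons hlt]
    have hstep : a * base + min a rem + (base + (if a < rem then 1 else 0)) =
        (a + 1) * base + min (a + 1) rem := by
      have h1 : (a + 1) * base = a * base + base := by ring
      have h2 : min (a + 1) rem = min a rem + (if a < rem then 1 else 0) := by
        split_ifs <;> omega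
      omega
    have hpos : ¬ (base + (if a < rem then 1 else 0) ≤ 0) := by split_ifs <;> omega
    simp only [pvALoop, hpos, if_false, List.map_cons]
    rw [hstep, ih (a + 1) _ (by omega) (by omega) (by omega)]
    simp

theorem compute_line_chunks_spec : Claim_equal_compute_line_chunks := by
  intro total_lines num_workers _
  unfold Spec_compute_line_chunks compute_line_chunks compute_line_chunks_alt
  by_cases h0 : total_lines = 0
  · simp [h0]
  · rw [if_neg h0]
    set k : Int := max 1 (min num_workers total_lines) with hk
    by_cases hneg : total_lines ≤ 0
    · -- negative total: k = 1, base = total_lines ≤ 0, the loop breaks immediately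
      rw [if_pos hneg]
      have hk1 : k = 1 := by omega
      rw [hk1]
      have hbase : PySem.Int.floordiv total_lines 1 = total_lines := by
        rw [PySem.Int.floordiv_eq_ediv_of_pos (by omega)]; simp
      simp only [PySem.List.pyRange_one_cons (by omega : (0:Int) < 1)]
      simp [pvALoop, hbase, show total_lines ≤ 0 by omega]
    · rw [if_neg hneg]
      have hkpos : 0 < k := by omega
      have hkle : k ≤ total_lines := by omega
      have hbase1 : 1 ≤ PySem.Int.floordiv total_lines k := by
        rw [PySem.Int.le_floordiv_iff_mul_le hkpos]; omega
      have hrem0 : 0 ≤ PySem.Int.mod total_lines k := by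
        rw [PySem.Int.mod_eq_emod_of_pos hkpos]
        exact Int.emod_nonneg _ (by omega)
      have := pvALoop_eq_map (PySem.Int.floordiv total_lines k)
        (PySem.Int.mod total_lines k) k hbase1 (k - 0).toNat 0 [] (by omega) (by omega) rfl
      simpa [hrem0, min_eq_left hrem0] using this
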